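-- pv_equiv track=rewrite | github.com/cmkobel/gwf_artic | workflow.py | sanify
-- ===== SOURCE A (Python) =====
-- def sanify(*input):
--     """ Makes sure that the name of the gwf target is not illegal. """
--     input = ''.join(input)
--     output = []
--
--
--     for i in str(input):
--
--         ascii = ord(i)
--         if (ascii >= 48 and ascii <= 57) or (ascii >= 65 and ascii <= 90) or (ascii >= 97 and ascii <= 122) or ascii == 95:
--             output.append(i)
--         else:
--             output.append('_')
--
--     return ''.join(output)
-- ===== SOURCE B (Python) =====
-- def _legal(c):
--     return c.isascii() and (c.isalnum() or c == '_')
--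
--
-- def sanify(*input):
--     """ Makes sure that the name of the gwf target is not illegal. """
--     s = ''.join(input)
--     chunks = []
--     i, n = 0, len(s)
--     while i < n:
--         legal = _legal(s[i])
--         j = i + 1
--         while j < n and _legal(s[j]) == legal:
--             j += 1
--         chunks.append(s[i:j] if legal else '_' * (j - i))
--         i = j
--     return ''.join(chunks)
-- ===== Notes on version B (the rewrite author's own statement) =====
-- stated objective: alternative
-- what changed: B scans the string as maximal runs of legal/illegal characters (two-pointer run detection) and emits each legal run as one slice and each illegal run as one underscore block of the same length, instead of A's per-character ord-range test appending one character at a time.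
import Mathlib
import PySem

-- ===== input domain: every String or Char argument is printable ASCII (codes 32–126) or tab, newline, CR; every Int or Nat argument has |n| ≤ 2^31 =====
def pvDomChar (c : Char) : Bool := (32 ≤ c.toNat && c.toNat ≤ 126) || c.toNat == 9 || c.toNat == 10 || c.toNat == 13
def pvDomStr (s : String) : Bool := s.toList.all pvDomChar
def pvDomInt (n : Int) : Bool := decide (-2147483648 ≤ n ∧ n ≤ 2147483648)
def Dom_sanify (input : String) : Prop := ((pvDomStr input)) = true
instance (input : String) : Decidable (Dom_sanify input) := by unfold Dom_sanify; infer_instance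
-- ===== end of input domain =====

-- B rewrites A's per-character test-and-append loop as a run-based scan: maximal runs of
-- legal/illegal characters, each emitted as one slice or one underscore block (objective: alternative).

-- ===== PORT A =====
-- literal transliteration: for each char, test the ord ranges, append kept char or '_'
def sanify (input : String) : String :=
  let output : List Char :=
    input.toList.foldl
      (fun output i =>
        let ascii : Nat := i.toNat
        if (48 ≤ ascii ∧ ascii ≤ 57) ∨ (65 ≤ ascii ∧ ascii ≤ 90) ∨
           (97 ≤ ascii ∧ ascii ≤ 122) ∨ ascii = 95 then
          output ++ [i]
        else
          output ++ ['_'])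
      []
  String.mk output

-- ===== PORT B =====
-- _legal: c.isascii() and (c.isalnum() or c == '_'); the isalnum test is only consulted
-- after the isascii guard, where ASCII isalnum is exactly digit-or-letter (exact port)
def pvLegal (c : Char) : Bool :=
  (c.toNat ≤ 127) &&
    (((48 ≤ c.toNat && c.toNat ≤ 57) || (65 ≤ c.toNat && c.toNat ≤ 90) ||
      (97 ≤ c.toNat && c.toNat ≤ 122)) || c == '_')

-- the outer while over runs: the inner `while j < n and _legal(s[j]) == legal` is exactly
-- takeWhile/dropWhile on the tail; each chunk is the run slice or '_' * (j - i)
def sanifyRuns : List Char → List Char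
  | [] => []
  | c :: cs =>
    let legal := pvLegal c
    let run := cs.takeWhile (fun d => pvLegal d == legal)
    let rest := cs.dropWhile (fun d => pvLegal d == legal)
    (if legal then c :: run else List.replicate (run.length + 1) '_') ++ sanifyRuns rest
termination_by l => l.length
decreasing_by
  have := List.length_dropWhile_le (fun d => pvLegal d == legal) cs
  simpa using Nat.lt_succ_of_le this

def sanify_alt (input : String) : String :=
  String.mk (sanifyRuns input.toList)

-- ===== PRECONDITION & SPEC =====
def Spec_sanify (input : String) (out : String) : Prop := out = sanify_alt input
instance (input : String) (out : String) : Decidable (Spec_sanify input out) := by unfold Spec_sanify; infer_instance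

-- ===== CLAIM (what is proved, stated in full; the proofs are below) =====
def Claim_equal_sanify : Prop := ∀ (input : String), Dom_sanify input → Spec_sanify input (sanify input)

-- ===== LEMMAS AND PROOFS =====

-- A's append-accumulating loop is map
theorem foldl_append_map (l : List Char) (acc : List Char) :
    l.foldl
      (fun output i =>
        let ascii : Nat := i.toNat
        if (48 ≤ ascii ∧ ascii ≤ 57) ∨ (65 ≤ ascii ∧ ascii ≤ 90) ∨
           (97 ≤ ascii ∧ ascii ≤ 122) ∨ ascii = 95 then
          output ++ [i]
        else
          output ++ ['_']) acc
    = acc ++ l.map (fun i =>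
        if (48 ≤ i.toNat ∧ i.toNat ≤ 57) ∨ (65 ≤ i.toNat ∧ i.toNat ≤ 90) ∨
           (97 ≤ i.toNat ∧ i.toNat ≤ 122) ∨ i.toNat = 95 then i else '_') := by
  induction l generalizing acc with
  | nil => simp
  | cons x xs ih =>
    simp only [List.foldl, List.map]
    rw [ih]
    split_ifs <;> simp

-- the run scan computes the per-character map
theorem sanifyRuns_eq_map (l : List Char) :
    sanifyRuns l = l.map (fun c => if pvLegal c then c else '_') := by
  have main : ∀ (n : Nat) (l : List Char), l.length ≤ n →
      sanifyRuns l = l.map (fun c => if pvLegal c then c else '_') := by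
    intro n
    induction n with
    | zero =>
      intro l hl
      have : l = [] := List.eq_nil_of_length_eq_zero (Nat.le_zero.mp hl)
      simp [this, sanifyRuns]
    | succ n ih =>
      intro l hl
      match l with
      | [] => simp [sanifyRuns]
      | c :: cs =>
        rw [sanifyRuns]
        have hlen : cs.length ≤ n := by simpa using Nat.le_of_succ_le_succ hl
        have hrest : (cs.dropWhile (fun d => pvLegal d == pvLegal c)).length ≤ n :=
          le_trans (List.length_dropWhile_le _ _) hlen
        rw [ih _ hrest]
        have hsplit : cs.takeWhile (fun d => pvLegal d == pvLegal c) ++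
            cs.dropWhile (fun d => pvLegal d == pvLegal c) = cs :=
          List.takeWhile_append_dropWhile
        have hrun : ∀ d ∈ cs.takeWhile (fun d => pvLegal d == pvLegal c),
            pvLegal d = pvLegal c := by
          intro d hd
          simpa using List.mem_takeWhile_imp hd
        conv_rhs => rw [List.map_cons, ← hsplit, List.map_append]
        by_cases hc : pvLegal c = true
        · rw [if_pos hc, if_pos hc]
          have hmap : (cs.takeWhile (fun d => pvLegal d == pvLegal c)).map
              (fun c => if pvLegal c then c else '_')
              = cs.takeWhile (fun d => pvLegal d == pvLegal c) := by
            refine (List.map_congr_left ?_).trans (List.map_id _)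
            intro d hd
            rw [if_pos ((hrun d hd).trans hc)]
            rfl
          rw [hmap]
          simp
        · rw [if_neg hc, if_neg hc]
          have hmap : (cs.takeWhile (fun d => pvLegal d == pvLegal c)).map
              (fun c => if pvLegal c then c else '_')
              = List.replicate (cs.takeWhile (fun d => pvLegal d == pvLegal c)).length '_' := by
            rw [← List.length_map (f := fun c => if pvLegal c then c else '_')
                  (as := cs.takeWhile (fun d => pvLegal d == pvLegal c))]
            apply List.eq_replicate_of_mem
            intro x hx
            rcases List.mem_map.mp hx with ⟨d, hd, hdx⟩
            rw [if_neg (by rw [hrun d hd]; exact hc)] at hdx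
            exact hdx.symm
          rw [hmap, List.replicate_succ]
          simp
  exact main l.length l (le_refl _)

-- per-character agreement of the two predicates
theorem cond_eq (c : Char) :
    (if (48 ≤ c.toNat ∧ c.toNat ≤ 57) ∨ (65 ≤ c.toNat ∧ c.toNat ≤ 90) ∨
        (97 ≤ c.toNat ∧ c.toNat ≤ 122) ∨ c.toNat = 95 then c else '_')
    = (if pvLegal c then c else '_') := by
  have h95 : c = '_' ↔ c.toNat = 95 := by
    constructor
    · intro h; subst h; rfl
    · intro h
      have hc := Char.ofNat_toNat c
      rw [← hc, h]
  have hb : pvLegal c = true ↔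
      ((48 ≤ c.toNat ∧ c.toNat ≤ 57) ∨ (65 ≤ c.toNat ∧ c.toNat ≤ 90) ∨
       (97 ≤ c.toNat ∧ c.toNat ≤ 122) ∨ c.toNat = 95) := by
    simp only [pvLegal, Bool.and_eq_true, Bool.or_eq_true, decide_eq_true_eq,
      beq_iff_eq, h95]
    omega
  exact if_congr hb.symm rfl rfl

-- ===== VERDICT (by name: the statement is the Claim_ definition above) =====
theorem sanify_spec : Claim_equal_sanify := by
  intro input _
  unfold Spec_sanify sanify sanify_alt
  rw [foldl_append_map, sanifyRuns_eq_map]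
  simp only [List.nil_append]
  congr 1
  exact List.map_congr_left (fun c _ => cond_eq c)
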